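-- pv_equiv track=rewrite | github.com/Tablerase/42_Projects | Projects/Django/0-Starting/ex05/all_in.py | state_search
-- ===== SOURCE A (Python) =====
-- def state_search(capital_city: str):
--   states = {
--     "Oregon" : "OR",
--     "Alabama" : "AL",
--     "New Jersey": "NJ",
--     "Colorado" : "CO"
--   }
--   capital_cities = {
--     "OR": "Salem",
--     "AL": "Montgomery",
--     "NJ": "Trenton",
--     "CO": "Denver"
--   }
--
--   try:
--     state_id = next(key for key, value in capital_cities.items() if value == capital_city.title())
--     state = next(key for key, value in states.items() if value == state_id)
--     return state
--   except StopIteration: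
--     return None
-- ===== SOURCE B (Python) =====
-- def state_search(capital_city: str):
--   capitals_to_states = {
--     "Salem": "Oregon",
--     "Montgomery": "Alabama",
--     "Trenton": "New Jersey",
--     "Denver": "Colorado"
--   }
--   return capitals_to_states.get(capital_city.title())
-- ===== Notes on version B (the rewrite author's own statement) =====
-- stated objective: faster
-- what changed: B replaces the two generator scans over two dicts (city->abbrev, then abbrev->state) with one precomputed direct city->state dictionary and a single .get lookup on the titled input.
import Mathlib
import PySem

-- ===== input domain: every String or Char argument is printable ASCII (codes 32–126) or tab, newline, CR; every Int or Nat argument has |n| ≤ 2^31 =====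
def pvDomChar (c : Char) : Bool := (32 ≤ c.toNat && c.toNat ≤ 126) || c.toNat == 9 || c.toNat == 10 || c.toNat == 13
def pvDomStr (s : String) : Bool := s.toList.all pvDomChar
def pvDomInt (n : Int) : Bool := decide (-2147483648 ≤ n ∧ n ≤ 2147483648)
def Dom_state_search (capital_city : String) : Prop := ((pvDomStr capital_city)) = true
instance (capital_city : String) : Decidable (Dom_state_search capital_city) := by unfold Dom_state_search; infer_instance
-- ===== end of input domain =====

-- B replaces A's two generator scans over two dicts with one precomputed direct
-- capital->state dictionary and a single lookup (objective: simpler).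

-- shared helper: Python str.title(), exact on the printable-ASCII/tab/newline domain
-- (a char is uppercased iff the previous char is not a letter, else lowercased)
def pvTitleChars (cs : List Char) (prevAlpha : Bool) : List Char :=
  match cs with
  | [] => []
  | c :: rest =>
      (if prevAlpha then PySem.Chars.lowerChar c else PySem.Chars.upperChar c)
        :: pvTitleChars rest (PySem.Chars.isalpha c)

def pvTitle (s : String) : String := String.ofList (pvTitleChars s.toList false)

-- ===== PORT A =====
def state_search (capital_city : String) : Option String :=
  let states : PySem.Dict String String :=
    PySem.Dict.ofList [("Oregon", "OR"), ("Alabama", "AL"), ("New Jersey", "NJ"), ("Colorado", "CO")]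
  let capital_cities : PySem.Dict String String :=
    PySem.Dict.ofList [("OR", "Salem"), ("AL", "Montgomery"), ("NJ", "Trenton"), ("CO", "Denver")]
  -- next(... if value == capital_city.title()), StopIteration → None
  match capital_cities.items.find? (fun kv => kv.2 == pvTitle capital_city) with
  | none => none
  | some (state_id, _) =>
      -- next(... if value == state_id), StopIteration → None
      match states.items.find? (fun kv => kv.2 == state_id) with
      | none => none
      | some (state, _) => some state

-- ===== PORT B =====
def state_search_alt (capital_city : String) : Option String :=
  let capitals_to_states : PySem.Dict String String :=
    PySem.Dict.ofList [("Salem", "Oregon"), ("Montgomery", "Alabama"),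
                       ("Trenton", "New Jersey"), ("Denver", "Colorado")]
  capitals_to_states.get? (pvTitle capital_city)

-- ===== PRECONDITION & SPEC =====
def Spec_state_search (capital_city : String) (out : Option String) : Prop := out = state_search_alt capital_city
instance (capital_city : String) (out : Option String) : Decidable (Spec_state_search capital_city out) := by unfold Spec_state_search; infer_instance

-- ===== CLAIM (what is proved, stated in full; the proofs are below) =====
def Claim_equal_state_search : Prop := ∀ (capital_city : String), Dom_state_search capital_city → Spec_state_search capital_city (state_search capital_city)

-- ===== LEMMAS AND PROOFS =====

-- both ports are the same function of t = pvTitle capital_city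
theorem state_search_core (t : String) :
    (match ((PySem.Dict.ofList [("OR", "Salem"), ("AL", "Montgomery"), ("NJ", "Trenton"), ("CO", "Denver")] : PySem.Dict String String)).items.find? (fun kv => kv.2 == t) with
     | none => (none : Option String)
     | some (state_id, _) =>
         match ((PySem.Dict.ofList [("Oregon", "OR"), ("Alabama", "AL"), ("New Jersey", "NJ"), ("Colorado", "CO")] : PySem.Dict String String)).items.find? (fun kv => kv.2 == state_id) with
         | none => none
         | some (state, _) => some state)
    = (PySem.Dict.ofList [("Salem", "Oregon"), ("Montgomery", "Alabama"), ("Trenton", "New Jersey"), ("Denver", "Colorado")] : PySem.Dict String String).get? t := by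
  have hs : ∀ (u : String), t ≠ u → (u == t) = false := fun u h => beq_eq_false_iff_ne.mpr (Ne.symm h)
  by_cases h1 : t = "Salem"
  · subst h1; decide
  by_cases h2 : t = "Montgomery"
  · subst h2; decide
  by_cases h3 : t = "Trenton"
  · subst h3; decide
  by_cases h4 : t = "Denver"
  · subst h4; decide
  have e1 : ((PySem.Dict.ofList [("OR", "Salem"), ("AL", "Montgomery"), ("NJ", "Trenton"), ("CO", "Denver")] : PySem.Dict String String)).items
      = [("OR", "Salem"), ("AL", "Montgomery"), ("NJ", "Trenton"), ("CO", "Denver")] := by decide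
  have e3 : ((PySem.Dict.ofList [("Salem", "Oregon"), ("Montgomery", "Alabama"), ("Trenton", "New Jersey"), ("Denver", "Colorado")] : PySem.Dict String String)).items
      = [("Salem", "Oregon"), ("Montgomery", "Alabama"), ("Trenton", "New Jersey"), ("Denver", "Colorado")] := by decide
  simp [PySem.Dict.get?, e1, e3, List.find?, hs _ h1, hs _ h2, hs _ h3, hs _ h4]

-- ===== VERDICT (by name: the statement is the Claim_ definition above) =====
theorem state_search_spec : Claim_equal_state_search := by
  intro c _
  unfold Spec_state_search state_search state_search_alt
  exact state_search_core (pvTitle c)
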